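-- pv_equiv track=rewrite | github.com/Yourleler/Decentralized-agent-discovery-governance | interop/request_policy.py | _match_resource_pattern
-- ===== SOURCE A (Python) =====
-- def _match_resource_pattern(requested_resource: str, allowed_resources: list[str]) -> bool:
--     """
--     资源匹配规则：
--     - `*` 表示全匹配
--     - `prefix*` 表示前缀匹配
--     - 其他按全等匹配
--     """
--     requested = str(requested_resource or "").strip()
--     if not allowed_resources:
--         return True
--
--     for item in allowed_resources:
--         pattern = str(item or "").strip()
--         if not pattern:
--             continue
--         if pattern == "*":
--             return True
--         if pattern.endswith("*") and requested.startswith(pattern[:-1]):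
--             return True
--         if requested == pattern:
--             return True
--     return False
-- ===== SOURCE B (Python) =====
-- def _match_resource_pattern(requested_resource: str, allowed_resources: list[str]) -> bool:
--     # Different data structure: build a character trie of all stripped patterns
--     # (prefix patterns 'p*' mark their end node with 'star', exact patterns with 'end'),
--     # then decide the query by a single walk of `requested` through the trie.
--     requested = str(requested_resource or "").strip()
--     if not allowed_resources:
--         return True
--     root = {"star": False, "end": False, "kids": {}}
--     for item in allowed_resources:
--         pattern = str(item or "").strip()
--         if not pattern:
--             continue
--         path = pattern[:-1] if pattern.endswith("*") else pattern
--         node = root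
--         for ch in path:
--             node = node["kids"].setdefault(ch, {"star": False, "end": False, "kids": {}})
--         if pattern.endswith("*"):
--             node["star"] = True
--         else:
--             node["end"] = True
--     node = root
--     for ch in requested:
--         if node["star"]:
--             return True
--         node = node["kids"].get(ch)
--         if node is None:
--             return False
--     return node["star"] or node["end"]
-- ===== Notes on version B (the rewrite author's own statement) =====
-- stated objective: alternative
-- what changed: B replaces A's sequential scan that tests each pattern against the request by a character trie: one build pass inserts every stripped pattern (prefix patterns mark a 'star' node, exact patterns an 'end' node), then a single walk of the requested string through the trie decides the match.
import Mathlib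
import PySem

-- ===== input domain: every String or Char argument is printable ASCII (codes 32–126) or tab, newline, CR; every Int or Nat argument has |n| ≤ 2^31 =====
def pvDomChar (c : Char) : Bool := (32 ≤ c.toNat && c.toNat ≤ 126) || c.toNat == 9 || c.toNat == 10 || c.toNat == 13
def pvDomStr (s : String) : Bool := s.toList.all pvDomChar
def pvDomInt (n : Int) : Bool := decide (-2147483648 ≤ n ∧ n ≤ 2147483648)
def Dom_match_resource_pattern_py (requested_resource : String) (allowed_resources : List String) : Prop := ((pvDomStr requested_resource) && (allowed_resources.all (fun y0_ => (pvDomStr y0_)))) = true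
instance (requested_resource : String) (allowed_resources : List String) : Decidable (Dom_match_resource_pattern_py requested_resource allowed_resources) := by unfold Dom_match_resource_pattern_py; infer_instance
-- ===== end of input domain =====

-- B replaces A's sequential per-pattern scan by a trie built once from all patterns and a single walk of the request (alternative, same cost here).

-- ===== PORT A =====
-- the `for item in allowed_resources` loop with its early returns
def pvLoopA (requested : String) : List String → Bool
  | [] => false
  | item :: rest =>
      let pattern := PySem.Str.strip item
      if pattern = "" then pvLoopA requested rest
      else if pattern = "*" then true
      else if PySem.Str.endswith pattern "*" &&
              PySem.Str.startswith requested (PySem.Str.slice pattern none (some (-1))) then true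
      else if requested = pattern then true
      else pvLoopA requested rest

def match_resource_pattern_py (requested_resource : String) (allowed_resources : List String) : Bool :=
  let requested := PySem.Str.strip requested_resource
  if allowed_resources.isEmpty then true
  else pvLoopA requested allowed_resources

-- ===== PORT B =====
-- Source B's trie node is {"star": Bool, "end": Bool, "kids": dict}; the kids dict (insertion
-- order, first-match lookup) is encoded first-child/next-sibling: a PTrie value is a sibling
-- chain of child entries (char, star flag, end flag, its kids chain, next sibling) — exact,
-- since dict lookup is first match and setdefault appends a new key at the end.
inductive PTrie where
  | nil : PTrie
  | node (c : Char) (star fin : Bool) (kids sib : PTrie) : PTrie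
deriving DecidableEq, Repr

-- chain of fresh nodes for a path absent from the kids dict (setdefault's inserted values)
def pvFresh : Char → List Char → Bool → PTrie
  | c, [], s => .node c s (!s) .nil .nil
  | c, c2 :: cs, s => .node c false false (pvFresh c2 cs s) .nil

-- the `for ch in path: node = node["kids"].setdefault(ch, …)` walk plus the final flag set,
-- acting on a kids chain
def pvInsF : PTrie → Char → List Char → Bool → PTrie
  | .nil, c, cs, s => pvFresh c cs s
  | .node c' st en ch sib, c, cs, s =>
    if c' = c then
      match cs with
      | [] => .node c' (st || s) (en || !s) ch sib
      | c2 :: cs2 => .node c' st en (pvInsF ch c2 cs2 s) sib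
    else .node c' st en ch (pvInsF sib c cs s)
termination_by t _ cs _ => (cs.length, sizeOf t)
decreasing_by
  all_goals simp_wf
  · apply Prod.Lex.left; simp
  · apply Prod.Lex.right; simp

-- insertion of one pattern path into the root node (root = (star, end, kids))
def pvInsRoot : Bool × Bool × PTrie → List Char → Bool → Bool × Bool × PTrie
  | (st, en, kids), [], s => (st || s, en || !s, kids)
  | (st, en, kids), c :: cs, s => (st, en, pvInsF kids c cs s)

-- node["kids"].get(ch)
def pvFindF : PTrie → Char → Option (Bool × Bool × PTrie)
  | .nil, _ => none
  | .node c' st en ch sib, c => if c' = c then some (st, en, ch) else pvFindF sib c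

-- the final `for ch in requested` walk
def pvWalk : Bool × Bool × PTrie → List Char → Bool
  | (st, en, _), [] => st || en
  | (st, _, kids), c :: cs =>
    if st then true
    else match pvFindF kids c with
      | none => false
      | some nd => pvWalk nd cs

-- the body of Source B's build loop, one item
def pvStepB (acc : Bool × Bool × PTrie) (item : String) : Bool × Bool × PTrie :=
  let pattern := PySem.Str.strip item
  if pattern = "" then acc
  else
    let isStar := PySem.Str.endswith pattern "*"
    let path := if isStar then (PySem.Str.slice pattern none (some (-1))).toList else pattern.toList
    pvInsRoot acc path isStar

def match_resource_pattern_py_alt (requested_resource : String) (allowed_resources : List String) : Bool :=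
  let requested := PySem.Str.strip requested_resource
  if allowed_resources.isEmpty then true
  else pvWalk (allowed_resources.foldl pvStepB (false, false, PTrie.nil)) requested.toList

-- ===== PRECONDITION & SPEC =====
def Spec_match_resource_pattern_py (requested_resource : String) (allowed_resources : List String) (out : Bool) : Prop := out = match_resource_pattern_py_alt requested_resource allowed_resources
instance (requested_resource : String) (allowed_resources : List String) (out : Bool) : Decidable (Spec_match_resource_pattern_py requested_resource allowed_resources out) := by unfold Spec_match_resource_pattern_py; infer_instance

-- ===== CLAIM (what is proved, stated in full; the proofs are below) =====
def Claim_equal_match_resource_pattern_py : Prop := ∀ (requested_resource : String) (allowed_resources : List String), Dom_match_resource_pattern_py requested_resource allowed_resources → Spec_match_resource_pattern_py requested_resource allowed_resources (match_resource_pattern_py requested_resource allowed_resources)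

-- ===== LEMMAS AND PROOFS =====

-- what one inserted path contributes to the walk: prefix match if star, exact match if not
def pvSingle (p : List Char) (s : Bool) (q : List Char) : Bool :=
  if s then decide (p <+: q) else decide (q = p)

-- the empty trie matches nothing
lemma pv_walk_empty (q : List Char) : pvWalk (false, false, PTrie.nil) q = false := by
  cases q <;> simp [pvWalk, pvFindF]

-- lookup of a different character is untouched by an insertion
lemma pv_find_ins_ne (t : PTrie) (c : Char) (cs : List Char) (s : Bool) (c0 : Char)
    (h : c0 ≠ c) : pvFindF (pvInsF t c cs s) c0 = pvFindF t c0 := by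
  induction t with
  | nil => cases cs <;> simp [pvInsF, pvFresh, pvFindF, Ne.symm h]
  | node c' st en ch sib ihc ihs =>
    by_cases hc : c' = c
    · subst hc
      cases cs <;> simp [pvInsF, pvFindF, Ne.symm h]
    · cases cs <;> simp [pvInsF, pvFindF, hc, ihs]

-- lookup of the inserted character sees the path pushed one level down
lemma pv_find_ins_eq (t : PTrie) (c : Char) (cs : List Char) (s : Bool) :
    pvFindF (pvInsF t c cs s) c
      = some (pvInsRoot ((pvFindF t c).getD (false, false, PTrie.nil)) cs s) := by
  induction t with
  | nil => cases cs <;> simp [pvInsF, pvFresh, pvFindF, pvInsRoot]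
  | node c' st en ch sib ihc ihs =>
    by_cases hc : c' = c
    · subst hc
      cases cs <;> simp [pvInsF, pvFindF, pvInsRoot]
    · cases cs <;> simp [pvInsF, pvFindF, hc, ihs]

-- peeling a shared head character off a path and a query
lemma pv_single_cons (c0 : Char) (cs : List Char) (s : Bool) (q' : List Char) :
    pvSingle (c0 :: cs) s (c0 :: q') = pvSingle cs s q' := by
  cases s <;> simp [pvSingle, List.cons_prefix_cons]

-- a path starting with a different character matches nothing starting with this one
lemma pv_single_ne (c c0 : Char) (cs q' : List Char) (s : Bool) (h0 : ¬ c0 = c) :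
    pvSingle (c :: cs) s (c0 :: q') = false := by
  have hc : c ≠ c0 := fun h => h0 h.symm
  cases s <;> simp [pvSingle, List.cons_prefix_cons, hc, h0]

-- inserting one path adds exactly its own match to every query
lemma pv_walk_ins (p : List Char) : ∀ (s : Bool) (nd : Bool × Bool × PTrie) (q : List Char),
    pvWalk (pvInsRoot nd p s) q = (pvWalk nd q || pvSingle p s q) := by
  induction p with
  | nil =>
    intro s nd q
    obtain ⟨st, en, kids⟩ := nd
    cases q with
    | nil => cases s <;> simp [pvInsRoot, pvWalk, pvSingle]
    | cons c q' => cases s <;> cases st <;> simp [pvInsRoot, pvWalk, pvSingle]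
  | cons c cs ih =>
    intro s nd q
    obtain ⟨st, en, kids⟩ := nd
    cases q with
    | nil => simp [pvInsRoot, pvWalk, pvSingle]
    | cons c0 q' =>
      cases st with
      | true => simp [pvInsRoot, pvWalk]
      | false =>
        by_cases h0 : c0 = c
        · subst h0
          rw [show pvInsRoot (false, en, kids) (c0 :: cs) s
                = (false, en, pvInsF kids c0 cs s) from rfl]
          simp only [pvWalk, Bool.false_eq_true, if_false, pv_find_ins_eq, ih, pv_single_cons]
          cases hfind : pvFindF kids c0 with
          | none => simp [pv_walk_empty]
          | some nd' => simp
        · rw [show pvInsRoot (false, en, kids) (c :: cs) s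
                = (false, en, pvInsF kids c cs s) from rfl]
          simp only [pvWalk, Bool.false_eq_true, if_false, pv_find_ins_ne kids c cs s c0 h0,
            pv_single_ne c c0 cs q' s h0, Bool.or_false]

-- what A's item-by-item scan tests equals what B's inserted path contributes
lemma pv_item_eq (requested pattern : String) :
    (if pattern = "" then false
     else if pattern = "*" then true
     else if PySem.Str.endswith pattern "*" &&
             PySem.Str.startswith requested (PySem.Str.slice pattern none (some (-1))) then true
     else decide (requested = pattern))
    = (if pattern = "" then false
       else pvSingle
            (if PySem.Str.endswith pattern "*"
             then (PySem.Str.slice pattern none (some (-1))).toList else pattern.toList)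
            (PySem.Str.endswith pattern "*") requested.toList) := by
  by_cases h0 : pattern = ""
  · simp [h0]
  · by_cases hstar : pattern = "*"
    · subst hstar
      have hend : PySem.Chars.endswith ['*'] ['*'] = true := by decide
      have hsl : (PySem.Str.slice "*" none (some (-1))).toList = ([] : List Char) := by decide
      simp [h0, hend, hsl, pvSingle, List.nil_prefix]
    · simp only [if_neg h0, if_neg hstar]
      by_cases hend : PySem.Str.endswith pattern "*" = true
      · by_cases hpre : PySem.Str.startswith requested (PySem.Str.slice pattern none (some (-1))) = true
        · have hendc : PySem.Chars.endswith pattern.toList ['*'] = true := by simpa using hend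
          have hprec : PySem.Chars.startswith requested.toList
              (PySem.List.slice pattern.toList none (some (-1))) = true := by simpa using hpre
          have hp : PySem.List.slice pattern.toList none (some (-1)) <+: requested.toList := by
            rw [← PySem.Chars.startswith_iff]; exact hprec
          simp [pvSingle, hendc, hprec, hp]
        · have hendc : PySem.Chars.endswith pattern.toList ['*'] = true := by simpa using hend
          have hprec : PySem.Chars.startswith requested.toList
              (PySem.List.slice pattern.toList none (some (-1))) = false := by
            simpa using hpre
          have hnp : ¬ (PySem.List.slice pattern.toList none (some (-1)) <+: requested.toList) := by
            rw [← PySem.Chars.startswith_iff, hprec]; simp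
          have hne : ¬ requested = pattern := by
            intro hr
            apply hnp
            rw [hr, PySem.List.slice_to_neg_one]
            exact List.dropLast_prefix _
          simp [pvSingle, hendc, hprec, hnp, hne]
      · have hb : PySem.Str.endswith pattern "*" = false := by simpa using hend
        simp only [hb, Bool.false_and, Bool.false_eq_true, if_false, pvSingle]
        simp [String.ext_iff]

-- B's build-then-walk over a list equals the accumulated walk OR A's scan result
lemma pv_fold_eq (requested : String) : ∀ (l : List String) (nd : Bool × Bool × PTrie),
    pvWalk (l.foldl pvStepB nd) requested.toList
      = (pvWalk nd requested.toList || pvLoopA requested l) := by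
  intro l
  induction l with
  | nil => intro nd; simp [pvLoopA]
  | cons item rest ih =>
    intro nd
    simp only [List.foldl_cons, ih]
    have hstep := pv_item_eq requested (PySem.Str.strip item)
    by_cases h0 : PySem.Str.strip item = ""
    · simp only [pvStepB, if_pos h0]
      simp [pvLoopA, h0]
    · simp only [pvStepB, if_neg h0]
      rw [pv_walk_ins]
      rw [if_neg h0, if_neg h0] at hstep
      by_cases hstar : PySem.Str.strip item = "*"
      · have h1 : pvSingle
            (if PySem.Str.endswith (PySem.Str.strip item) "*"
             then (PySem.Str.slice (PySem.Str.strip item) none (some (-1))).toList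
             else (PySem.Str.strip item).toList)
            (PySem.Str.endswith (PySem.Str.strip item) "*") requested.toList = true := by
          rw [← hstep]; simp [hstar]
        have hA : pvLoopA requested (item :: rest) = true := by simp [pvLoopA, hstar]
        rw [hA, h1]
        simp
      · rw [if_neg hstar] at hstep
        rw [← hstep]
        simp only [pvLoopA, if_neg h0, if_neg hstar]
        split_ifs <;> simp_all

-- ===== VERDICT (by name: the statement is the Claim_ definition above) =====
theorem match_resource_pattern_py_spec : Claim_equal_match_resource_pattern_py := by
  intro req allowed _
  unfold Spec_match_resource_pattern_py match_resource_pattern_py match_resource_pattern_py_alt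
  by_cases h : allowed.isEmpty
  · simp [h]
  · simp only [h, Bool.false_eq_true, if_false]
    rw [pv_fold_eq (PySem.Str.strip req) allowed (false, false, PTrie.nil), pv_walk_empty]
    simp
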